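-- pv_equiv track=rewrite | github.com/ejsadiarin/dlsu-id-name-scraper | main.py | is_dlsu_id
-- ===== SOURCE A (Python) =====
-- def is_dlsu_id(id: int) -> bool:
--     """
--     Verifies if the given 8-digit ID is a valid Lasalian ID.
--     Each digit is multiplied by a decreasing weight from 8 to 1.
--     The sum must be divisible by 11.
--     """
--     dlsu_len_str = str(id)
--     if len(dlsu_len_str) != 8:
--         return False
--
--     total = 0
--     for i in range(8):
--         total += int(dlsu_len_str[i]) * (8 - i)
--
--     return total % 11 == 0
-- ===== SOURCE B (Python) =====
-- def is_dlsu_id(id: int) -> bool: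
--     s = str(id)
--     if len(s) != 8:
--         return False
--     total = subtotal = 0
--     for ch in s:
--         subtotal += int(ch)
--         total += subtotal
--     return total % 11 == 0
-- ===== Notes on version B (the rewrite author's own statement) =====
-- stated objective: alternative
-- what changed: replaces the index loop with explicit decreasing weights by a direct iteration over the characters keeping a running subtotal whose re-accumulation into the total yields the same weighted sum without any multiplication or index arithmetic
import Mathlib
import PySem

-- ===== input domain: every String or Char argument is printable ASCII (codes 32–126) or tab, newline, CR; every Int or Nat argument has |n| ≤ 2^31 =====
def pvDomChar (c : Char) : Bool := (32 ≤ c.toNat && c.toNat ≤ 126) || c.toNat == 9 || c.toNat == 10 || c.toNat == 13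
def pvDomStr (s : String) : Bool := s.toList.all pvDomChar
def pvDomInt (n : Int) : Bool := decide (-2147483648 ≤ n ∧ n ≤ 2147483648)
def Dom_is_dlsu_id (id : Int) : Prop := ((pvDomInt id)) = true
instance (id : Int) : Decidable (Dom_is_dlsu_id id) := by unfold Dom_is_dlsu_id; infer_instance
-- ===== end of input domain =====

-- B replaces the weighted index loop by a character iteration with a running subtotal
-- re-accumulated into the total; equivalence of the return values is proved on Pre_.
-- ===== PORT A =====
def is_dlsu_id (id : Int) : Bool :=
  let dlsu_len_str := PySem.Int.toStr id
  if PySem.Str.len dlsu_len_str ≠ 8 then false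
  else
    -- int(dlsu_len_str[i]): a 1-char string; ported as ofChars? on the char; .getD 0 is
    -- unreachable inside Pre_ (Python raises ValueError there)
    let total := (PySem.List.pyRange 0 8 1).foldl
      (fun total i =>
        total + ((PySem.Str.pyGet? dlsu_len_str i).bind
                  (fun c => PySem.Int.ofChars? [c])).getD 0 * (8 - i)) 0
    PySem.Int.mod total 11 == 0

-- ===== PORT B =====
def is_dlsu_id_alt (id : Int) : Bool :=
  let s := PySem.Int.toStr id
  if PySem.Str.len s ≠ 8 then false
  else
    -- for ch in s: subtotal += int(ch); total += subtotal
    let r := s.toList.foldl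
      (fun (p : Int × Int) ch =>
        let subtotal := p.2 + (PySem.Int.ofChars? [ch]).getD 0
        (p.1 + subtotal, subtotal)) (0, 0)
    PySem.Int.mod r.1 11 == 0

-- ===== PRECONDITION & SPEC =====
-- Pre_ excludes exactly the ids whose str is a minus sign followed by seven digits: there both
-- Pythons raise ValueError at int('-').
def Pre_is_dlsu_id (id : Int) : Prop := ¬ (-9999999 ≤ id ∧ id ≤ -1000000)
instance (id : Int) : Decidable (Pre_is_dlsu_id id) := by unfold Pre_is_dlsu_id; infer_instance
def pvWitness_is_dlsu_id : Int := (11111112)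
def Spec_is_dlsu_id (id : Int) (out : Bool) : Prop := out = is_dlsu_id_alt id
instance (id : Int) (out : Bool) : Decidable (Spec_is_dlsu_id id out) := by unfold Spec_is_dlsu_id; infer_instance

-- ===== CLAIM (what is proved, stated in full; the proofs are below) =====
def Claim_equal_is_dlsu_id : Prop := ∀ (id : Int), Dom_is_dlsu_id id → Pre_is_dlsu_id id → Spec_is_dlsu_id id (is_dlsu_id id)

-- ===== LEMMAS AND PROOFS =====

-- on any 8-character string the two checksum loops compute the same total:
-- A's weighted sum Σ v_i·(8-i) equals B's re-accumulated running subtotal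
theorem checksum_fold_eq (l : List Char) (h : l.length = 8) :
    (PySem.List.pyRange 0 8 1).foldl
        (fun total i =>
          total + ((PySem.List.pyGet? l i).bind
                    (fun c => PySem.Int.ofChars? [c])).getD 0 * (8 - i)) 0
      = (l.foldl (fun (p : Int × Int) ch =>
          let subtotal := p.2 + (PySem.Int.ofChars? [ch]).getD 0
          (p.1 + subtotal, subtotal)) (0, 0)).1 := by
  match l, h with
  | [a,b,c,d,e,f,g,h'], _ =>
    rw [show PySem.List.pyRange 0 8 1 = [0,1,2,3,4,5,6,7] from by decide]
    norm_num [PySem.List.pyGet?, PySem.List.pyIdx?, List.foldl]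
    simp only [show Int.toNat 2 = 2 from rfl, show Int.toNat 3 = 3 from rfl,
      show Int.toNat 4 = 4 from rfl, show Int.toNat 5 = 5 from rfl,
      show Int.toNat 6 = 6 from rfl, show Int.toNat 7 = 7 from rfl,
      List.getElem_cons_succ, List.getElem_cons_zero]
    ring

-- ===== VERDICT (by name: the statement is the Claim_ definition above) =====
theorem is_dlsu_id_spec : Claim_equal_is_dlsu_id := by
  intro id _ _
  unfold Spec_is_dlsu_id is_dlsu_id is_dlsu_id_alt
  simp only [PySem.Str.len_eq, PySem.Str.pyGet?_eq, PySem.Chars.pyGet?_eq_listPyGet?,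
    PySem.Int.toList_toStr]
  by_cases h : ((PySem.Int.toChars id).length : Int) = 8
  · rw [if_neg (not_not_intro h), if_neg (not_not_intro h)]
    rw [checksum_fold_eq _ (by exact_mod_cast h)]
  · rw [if_pos h, if_pos h]
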